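-- pv_equiv track=rewrite | github.com/ChuyueSun/VerusFT_RL | verus_dataset/wrap.py | unwrap_for_display
-- ===== SOURCE A (Python) =====
-- def unwrap_for_display(content: str) -> str:
--     """
--     Remove boilerplate from wrapped code for cleaner display.
--
--     Useful for generating training examples where we want minimal cruft.
--     """
--     lines = content.strip().split("\n")
--     result_lines = []
--
--     # Skip allow attributes at the start
--     skip_allows = True
--     in_verus_macro = False
--     verus_depth = 0
--
--     for line in lines:
--         stripped = line.strip()
--
--         # Skip initial allow attributes
--         if skip_allows:
--             if stripped.startswith("#![allow") or stripped == "":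
--                 continue
--             skip_allows = False
--
--         # Track verus! macro for potential extraction
--         if stripped.startswith("verus!"):
--             in_verus_macro = True
--             verus_depth = 1
--             continue
--
--         if in_verus_macro:
--             verus_depth += line.count("{") - line.count("}")
--             if verus_depth <= 0 and stripped.startswith("}"):
--                 in_verus_macro = False
--                 continue
--
--         result_lines.append(line)
--
--     # If we're still in verus macro, we extracted the content
--     # Otherwise return original without allows
--     return "\n".join(result_lines).strip()
-- ===== SOURCE B (Python) =====
-- def unwrap_for_display(content: str) -> str:
--     """Remove boilerplate from wrapped code for cleaner display."""
--     lines = content.strip().split("\n")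
--     n = len(lines)
--     # Phase 1: skip the leading run of blank / #![allow lines.
--     i = 0
--     while i < n and (lines[i].strip() == "" or lines[i].strip().startswith("#![allow")):
--         i += 1
--     # Phase 2: index-driven scan with an explicit nested brace-matching loop per verus! block.
--     out = []
--     while i < n:
--         if lines[i].strip().startswith("verus!"):
--             i += 1
--             depth = 1
--             while i < n:
--                 s = lines[i].strip()
--                 if s.startswith("verus!"):
--                     depth = 1
--                     i += 1
--                     continue
--                 depth += lines[i].count("{") - lines[i].count("}")
--                 if depth <= 0 and s.startswith("}"):
--                     i += 1
--                     break
--                 out.append(lines[i])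
--                 i += 1
--         else:
--             out.append(lines[i])
--             i += 1
--     return "\n".join(out).strip()
-- ===== Notes on version B (the rewrite author's own statement) =====
-- stated objective: alternative
-- what changed: Replaces A's single fold carrying skip/in-macro boolean flags and a depth counter by a phase decomposition: a separate prefix-skip of blank/#![allow lines, then an index scan with an explicit nested brace-matching loop per verus! block.
import Mathlib
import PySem

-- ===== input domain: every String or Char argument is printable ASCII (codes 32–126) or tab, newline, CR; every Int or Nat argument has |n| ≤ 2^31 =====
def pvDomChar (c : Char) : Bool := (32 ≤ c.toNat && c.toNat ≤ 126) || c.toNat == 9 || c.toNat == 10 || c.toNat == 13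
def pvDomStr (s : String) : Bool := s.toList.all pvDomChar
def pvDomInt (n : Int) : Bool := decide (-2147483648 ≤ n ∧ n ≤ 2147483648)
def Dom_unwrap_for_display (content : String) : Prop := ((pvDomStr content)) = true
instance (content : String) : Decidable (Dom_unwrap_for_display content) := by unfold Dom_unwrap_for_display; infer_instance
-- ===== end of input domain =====

-- B replaces A's one fold with flag state by a prefix-skip phase plus an index scan with a
-- nested brace-matching loop per verus! block (alternative decomposition, same cost).

-- ===== PORT A =====
-- state = (result_lines, skip_allows, in_verus_macro, verus_depth)
def pvAStep (st : List String × Bool × Bool × Int) (line : String) :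
    List String × Bool × Bool × Int :=
  let (res, skipA, inV, depth) := st
  let stripped := PySem.Str.strip line
  if skipA && (PySem.Str.startswith stripped "#![allow" || stripped == "") then
    (res, skipA, inV, depth)
  else
    if PySem.Str.startswith stripped "verus!" then
      (res, false, true, 1)
    else if inV then
      let d := depth + (PySem.Str.count line "{" : Int) - (PySem.Str.count line "}" : Int)
      if d ≤ 0 && PySem.Str.startswith stripped "}" then
        (res, false, false, d)
      else
        (res ++ [line], false, true, d)
    else
      (res ++ [line], false, inV, depth)

def unwrap_for_display (content : String) : String :=
  let lines := (PySem.Str.split? (PySem.Str.strip content) "\n").getD []  -- sep "\n" ≠ "": split? is some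
  let st := lines.foldl pvAStep ([], true, false, 0)
  PySem.Str.strip (PySem.Str.join "\n" st.1)

-- ===== PORT B =====
-- phase 1: drop the leading run of blank / "#![allow" lines
def pvBSkip : List String → List String
  | [] => []
  | l :: rest =>
    if PySem.Str.strip l == "" || PySem.Str.startswith (PySem.Str.strip l) "#![allow" then
      pvBSkip rest
    else l :: rest

-- phase 2: outer scan (pvBScan) with a nested brace-matching loop per verus! block (pvBVerus)
mutual
def pvBVerus (depth : Int) : List String → List String
  | [] => []
  | l :: rest =>
    let s := PySem.Str.strip l
    if PySem.Str.startswith s "verus!" then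
      pvBVerus 1 rest
    else
      let d := depth + (PySem.Str.count l "{" : Int) - (PySem.Str.count l "}" : Int)
      if d ≤ 0 && PySem.Str.startswith s "}" then
        pvBScan rest
      else
        l :: pvBVerus d rest

def pvBScan : List String → List String
  | [] => []
  | l :: rest =>
    if PySem.Str.startswith (PySem.Str.strip l) "verus!" then
      pvBVerus 1 rest
    else
      l :: pvBScan rest
end

def unwrap_for_display_alt (content : String) : String :=
  let lines := (PySem.Str.split? (PySem.Str.strip content) "\n").getD []  -- sep "\n" ≠ "": split? is some
  PySem.Str.strip (PySem.Str.join "\n" (pvBScan (pvBSkip lines)))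

-- ===== PRECONDITION & SPEC =====
def Spec_unwrap_for_display (content : String) (out : String) : Prop := out = unwrap_for_display_alt content
instance (content : String) (out : String) : Decidable (Spec_unwrap_for_display content out) := by unfold Spec_unwrap_for_display; infer_instance

-- ===== CLAIM (what is proved, stated in full; the proofs are below) =====
def Claim_equal_unwrap_for_display : Prop := ∀ (content : String), Dom_unwrap_for_display content → Spec_unwrap_for_display content (unwrap_for_display content)

-- ===== LEMMAS AND PROOFS =====

-- In the non-skip states, A's fold accumulates exactly B's scan / verus output.
theorem pvA_nonskip (lines : List String) :
    (∀ (res : List String) (d : Int),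
        (lines.foldl pvAStep (res, false, false, d)).1 = res ++ pvBScan lines) ∧
    (∀ (res : List String) (depth : Int),
        (lines.foldl pvAStep (res, false, true, depth)).1 = res ++ pvBVerus depth lines) := by
  induction lines with
  | nil => simp [pvBScan, pvBVerus]
  | cons l rest ih =>
    constructor
    · intro res d
      rw [List.foldl_cons]
      simp only [pvAStep, pvBScan, Bool.false_and]
      by_cases hv : PySem.Str.startswith (PySem.Str.strip l) "verus!" = true
      · rw [hv]
        simp [ih.2]
      · rw [Bool.eq_false_iff.mpr hv]
        simp [ih.1]
    · intro res depth
      rw [List.foldl_cons]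
      simp only [pvAStep, pvBVerus, Bool.false_and]
      by_cases hv : PySem.Str.startswith (PySem.Str.strip l) "verus!" = true
      · rw [hv]
        simp [ih.2]
      · rw [Bool.eq_false_iff.mpr hv]
        by_cases hx : ((depth + (PySem.Str.count l "{" : Int) - (PySem.Str.count l "}" : Int) ≤ 0 : Bool)
            && PySem.Str.startswith (PySem.Str.strip l) "}") = true
        · rw [hx]
          simp [ih.1]
        · rw [Bool.eq_false_iff.mpr hx]
          simp [ih.2]

-- From the initial skip state, A's fold accumulates B's scan of the skipped tail.
theorem pvA_skip (lines : List String) (res : List String) :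
    (lines.foldl pvAStep (res, true, false, 0)).1 = res ++ pvBScan (pvBSkip lines) := by
  induction lines with
  | nil => simp [pvBSkip, pvBScan]
  | cons l rest ih =>
    by_cases hs : (PySem.Str.startswith (PySem.Str.strip l) "#![allow"
        || PySem.Str.strip l == "") = true
    · have hs' : (PySem.Str.strip l == "" || PySem.Str.startswith (PySem.Str.strip l) "#![allow") = true := by
        rw [Bool.or_comm]; exact hs
      have hstep : pvAStep (res, true, false, 0) l = (res, true, false, 0) := by
        simp only [pvAStep]
        rw [hs]
        simp
      have hskip : pvBSkip (l :: rest) = pvBSkip rest := by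
        simp only [pvBSkip]
        rw [hs']
        rfl
      rw [List.foldl_cons, hstep, ih, hskip]
    · have hsf : (PySem.Str.startswith (PySem.Str.strip l) "#![allow"
          || PySem.Str.strip l == "") = false := Bool.eq_false_iff.mpr hs
      have hs' : (PySem.Str.strip l == "" || PySem.Str.startswith (PySem.Str.strip l) "#![allow") = false := by
        rw [Bool.or_comm]; exact hsf
      have hstep : pvAStep (res, true, false, 0) l = pvAStep (res, false, false, 0) l := by
        simp only [pvAStep]
        rw [hsf]
        simp
      rw [List.foldl_cons, hstep, ← List.foldl_cons,
        (pvA_nonskip (l :: rest)).1 res 0]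
      have hskip : pvBSkip (l :: rest) = l :: rest := by
        simp only [pvBSkip]
        rw [hs']
        rfl
      rw [hskip]

-- ===== VERDICT (by name: the statement is the Claim_ definition above) =====
theorem unwrap_for_display_spec : Claim_equal_unwrap_for_display := by
  intro content _
  simp only [Spec_unwrap_for_display, unwrap_for_display, unwrap_for_display_alt]
  rw [pvA_skip, List.nil_append]
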